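-- pv_equiv track=rewrite | github.com/kkitsios/Complex-Data-Projects | assignment1/src/partTest.py | create_equidepth_histogram
-- ===== SOURCE A (Python) =====
-- def create_equidepth_histogram(data, num_bins):
--     sorted_data = sorted(data)
--     n = len(data)
--     bin_size = n // num_bins
--     remainder = n % num_bins
--
--     bins_list = []
--     hist = []
--     start = 0
--     for i in range(num_bins):
--         if i == num_bins - 1:
--             end = n
--         else:
--             end = start + bin_size
--             if i >= num_bins - remainder:
--                 end += 1
--
--         bins_list.append(sorted_data[start])
--         hist.append(end - start)
--
--         if i == num_bins - 1:
--             bins_list.append(sorted_data[end - 1])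
--
--         start = end
--
--     return hist, bins_list
-- ===== SOURCE B (Python) =====
-- def create_equidepth_histogram(data, num_bins):
--     s = sorted(data)
--     n = len(s)
--     q = n // num_bins
--     r = n % num_bins
--     hist = [q] * (num_bins - r) + [q + 1] * r
--     bins_list = [s[i * q + max(0, i - (num_bins - r))] for i in range(num_bins)]
--     bins_list.append(s[-1])
--     return hist, bins_list
-- ===== Notes on version B (the rewrite author's own statement) =====
-- stated objective: simpler
-- what changed: A builds hist and boundary values with a sequential loop carrying a running start offset and per-iteration branching; B computes the bin sizes in closed form ([q]*(m-r)+[q+1]*r) and each bin's start index arithmetically (i*q + max(0, i-(m-r))), so there is no loop-carried state.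
-- outside the precondition, e.g. on create_equidepth_histogram([1, 2], -1): A returns ([], []), B returns ([], [2])
import Mathlib
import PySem

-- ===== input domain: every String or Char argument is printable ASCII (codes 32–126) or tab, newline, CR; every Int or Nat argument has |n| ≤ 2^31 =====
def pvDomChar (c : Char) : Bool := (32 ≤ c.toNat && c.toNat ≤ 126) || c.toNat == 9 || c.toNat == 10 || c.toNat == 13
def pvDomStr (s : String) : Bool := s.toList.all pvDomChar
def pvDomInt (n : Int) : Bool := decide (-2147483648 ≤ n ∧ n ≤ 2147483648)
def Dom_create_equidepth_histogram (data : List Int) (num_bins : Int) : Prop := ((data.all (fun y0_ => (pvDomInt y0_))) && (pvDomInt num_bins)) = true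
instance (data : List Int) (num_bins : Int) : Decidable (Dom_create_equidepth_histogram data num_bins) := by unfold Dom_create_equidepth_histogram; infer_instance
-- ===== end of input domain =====

-- B replaces A's sequential loop (running start offset, branching per iteration) by
-- closed-form bin sizes and closed-form boundary indices; objective: simpler.


-- ===== PORT A =====
-- the body of A's for-loop, step for step (state: bins_list, hist, start)
def pvStepA (sorted_data : List Int) (n num_bins bin_size remainder : Int)
    (acc : List Int × List Int × Int) (i : Int) : List Int × List Int × Int :=
  let bins_list := acc.1
  let hist := acc.2.1
  let start := acc.2.2
  let e : Int :=
    if i = num_bins - 1 then n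
    else
      let e := start + bin_size
      if num_bins - remainder ≤ i then e + 1 else e
  let bins_list := bins_list ++ [PySem.List.pyGetD sorted_data start 0]
  let hist := hist ++ [e - start]
  let bins_list :=
    if i = num_bins - 1 then bins_list ++ [PySem.List.pyGetD sorted_data (e - 1) 0]
    else bins_list
  (bins_list, hist, e)

def create_equidepth_histogram (data : List Int) (num_bins : Int) : List (List Int) :=
  let sorted_data := PySem.List.sorted data (fun x => x) false
  let n : Int := data.length
  let bin_size := PySem.Int.floordiv n num_bins
  let remainder := PySem.Int.mod n num_bins
  let st := (PySem.List.pyRange 0 num_bins 1).foldl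
    (pvStepA sorted_data n num_bins bin_size remainder) ([], [], 0)
  [st.2.1, st.1]

-- ===== PORT B =====
def create_equidepth_histogram_alt (data : List Int) (num_bins : Int) : List (List Int) :=
  let s := PySem.List.sorted data (fun x => x) false
  let n : Int := s.length
  let q := PySem.Int.floordiv n num_bins
  let r := PySem.Int.mod n num_bins
  let hist := List.replicate (num_bins - r).toNat q ++ List.replicate r.toNat (q + 1)
  let bins_list := (PySem.List.pyRange 0 num_bins 1).map
    (fun i => PySem.List.pyGetD s (i * q + max 0 (i - (num_bins - r))) 0)
  [hist, bins_list ++ [PySem.List.pyGetD s (-1) 0]]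

-- ===== PRECONDITION & SPEC =====
-- Pre_ restricts to the function's natural domain (at least one bin, nonempty data):
-- A raises ZeroDivisionError on num_bins = 0 and IndexError on empty data, and for
-- negative num_bins returns a degenerate ([], []) outside the natural domain.
def Pre_create_equidepth_histogram (data : List Int) (num_bins : Int) : Prop :=
  1 ≤ num_bins ∧ data ≠ []
instance (data : List Int) (num_bins : Int) : Decidable (Pre_create_equidepth_histogram data num_bins) := by unfold Pre_create_equidepth_histogram; infer_instance
def pvWitness_create_equidepth_histogram : List Int × Int := ([3, 1, 2], 2)

def Spec_create_equidepth_histogram (data : List Int) (num_bins : Int) (out : List (List Int)) : Prop := out = create_equidepth_histogram_alt data num_bins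
instance (data : List Int) (num_bins : Int) (out : List (List Int)) : Decidable (Spec_create_equidepth_histogram data num_bins out) := by unfold Spec_create_equidepth_histogram; infer_instance

-- ===== CLAIM (what is proved, stated in full; the proofs are below) =====
def Claim_equal_create_equidepth_histogram : Prop := ∀ (data : List Int) (num_bins : Int), Dom_create_equidepth_histogram data num_bins → Pre_create_equidepth_histogram data num_bins → Spec_create_equidepth_histogram data num_bins (create_equidepth_histogram data num_bins)

-- ===== LEMMAS AND PROOFS =====

-- start index of bin i (closed form); mr = num_bins - remainder
def pvStIdx (q mr : Int) (i : Int) : Int := i * q + max 0 (i - mr)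

theorem pv_stIdx_succ (q mr i : Int) :
    pvStIdx q mr (i + 1) = pvStIdx q mr i + q + (if mr ≤ i then 1 else 0) := by
  unfold pvStIdx
  have h : (i + 1) * q = i * q + q := by ring
  rw [h]
  split_ifs with hle <;> omega

theorem pv_step_eq (s : List Int) (n m q r a : Int) (hm : 1 ≤ m) (hr0 : 0 ≤ r) (hrm : r < m)
    (hn : n = m * q + r) (ha0 : 0 ≤ a) (ham : a < m) (B H : List Int) :
    pvStepA s n m q r (B, H, pvStIdx q (m - r) a) a
      = (B ++ [PySem.List.pyGetD s (pvStIdx q (m - r) a) 0]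
           ++ (if a = m - 1 then [PySem.List.pyGetD s (n - 1) 0] else []),
         H ++ [pvStIdx q (m - r) (a + 1) - pvStIdx q (m - r) a],
         pvStIdx q (m - r) (a + 1)) := by
  have htop : a = m - 1 → pvStIdx q (m - r) (a + 1) = n := by
    intro h1
    unfold pvStIdx
    have h3 : (a + 1) * q = m * q := by rw [h1]; ring
    omega
  by_cases h1 : a = m - 1
  · have he : pvStIdx q (m - r) (a + 1) = n := htop h1
    simp only [pvStepA, if_pos h1, he]
  · have he : (if m - r ≤ a then pvStIdx q (m - r) a + q + 1 else pvStIdx q (m - r) a + q)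
        = pvStIdx q (m - r) (a + 1) := by
      rw [pv_stIdx_succ]
      split_ifs with h2 <;> omega
    simp only [pvStepA, if_neg h1]
    rw [he]
    simp

theorem pv_fold_inv (s : List Int) (n m q r : Int) (hm : 1 ≤ m) (hr0 : 0 ≤ r) (hrm : r < m)
    (hn : n = m * q + r) :
    ∀ (a : Int), 0 ≤ a → a ≤ m → ∀ (B H : List Int),
    (PySem.List.pyRange a m 1).foldl (pvStepA s n m q r) (B, H, pvStIdx q (m - r) a)
    = (B ++ (PySem.List.pyRange a m 1).map (fun i => PySem.List.pyGetD s (pvStIdx q (m - r) i) 0)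
         ++ (if a < m then [PySem.List.pyGetD s (n - 1) 0] else []),
       H ++ (PySem.List.pyRange a m 1).map (fun i => pvStIdx q (m - r) (i + 1) - pvStIdx q (m - r) i),
       pvStIdx q (m - r) (if a < m then m else a)) := by
  intro a ha0 ham
  induction hk : (m - a).toNat generalizing a with
  | zero =>
    intro B H
    have haeq : a = m := by omega
    rw [PySem.List.pyRange_one_eq_nil (by omega)]
    simp only [List.foldl_nil, List.map_nil, List.append_nil,
      if_neg (show ¬ a < m by omega)]
  | succ k ih =>
    intro B H
    have ham' : a < m := by omega
    rw [PySem.List.pyRange_one_cons ham']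
    simp only [List.foldl_cons, List.map_cons]
    rw [pv_step_eq s n m q r a hm hr0 hrm hn ha0 ham' B H]
    rw [ih (a + 1) (by omega) (by omega) (by omega)]
    by_cases hlast : a = m - 1
    · have hrest : PySem.List.pyRange (a + 1) m 1 = [] := by
        apply PySem.List.pyRange_one_eq_nil; omega
      rw [hrest]
      simp only [List.map_nil, List.append_nil, if_pos hlast,
        if_neg (show ¬ a + 1 < m by omega), if_pos ham', List.map_cons]
      simp only [Prod.mk.injEq]
      refine ⟨by simp, by simp, ?_⟩
      rw [show a + 1 = m by omega]
    · have h1m : a + 1 < m := by omega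
      simp only [if_neg hlast, if_pos h1m, if_pos ham', List.map_cons, List.append_nil]
      simp [List.append_assoc]

theorem pv_map_const_range (f : Int → Int) (a b c : Int)
    (h : ∀ i, a ≤ i → i < b → f i = c) :
    (PySem.List.pyRange a b 1).map f = List.replicate (b - a).toNat c := by
  have hlen : ((PySem.List.pyRange a b 1).map f).length = (b - a).toNat := by
    rw [List.length_map, PySem.List.length_pyRange_one]
  rw [← hlen]
  apply List.eq_replicate_of_mem
  intro x hx
  rcases List.mem_map.mp hx with ⟨i, hi, hfx⟩
  rw [PySem.List.mem_pyRange_one] at hi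
  rw [← hfx]; exact h i hi.1 hi.2

theorem pv_hist_eq (q m r : Int) (h0 : 0 ≤ r) (hrm : r < m) :
    (PySem.List.pyRange 0 m 1).map (fun i => pvStIdx q (m - r) (i + 1) - pvStIdx q (m - r) i)
      = List.replicate (m - r).toNat q ++ List.replicate r.toNat (q + 1) := by
  have hsplit : PySem.List.pyRange 0 m 1
      = PySem.List.pyRange 0 (m - r) 1 ++ PySem.List.pyRange (m - r) m 1 := by
    rw [PySem.List.pyRange_one_append] <;> omega
  rw [hsplit, List.map_append]
  congr 1
  · have := pv_map_const_range (fun i => pvStIdx q (m - r) (i + 1) - pvStIdx q (m - r) i)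
      0 (m - r) q
      (by intro i hi1 hi2
          show pvStIdx q (m - r) (i + 1) - pvStIdx q (m - r) i = q
          rw [pv_stIdx_succ, if_neg (by omega)]; ring)
    simpa using this
  · have := pv_map_const_range (fun i => pvStIdx q (m - r) (i + 1) - pvStIdx q (m - r) i)
      (m - r) m (q + 1)
      (by intro i hi1 hi2
          show pvStIdx q (m - r) (i + 1) - pvStIdx q (m - r) i = q + 1
          rw [pv_stIdx_succ, if_pos (by omega)]; ring)
    have h2 : (m - (m - r)).toNat = r.toNat := by omega
    rw [h2] at this
    simpa using this

-- ===== VERDICT (by name: the statement is the Claim_ definition above) =====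
theorem create_equidepth_histogram_spec : Claim_equal_create_equidepth_histogram := by
  intro data num_bins _hdom hpre
  obtain ⟨hm, hne⟩ := hpre
  unfold Spec_create_equidepth_histogram
  unfold create_equidepth_histogram create_equidepth_histogram_alt
  have hlen : (PySem.List.sorted data (fun x => x) false).length = data.length :=
    PySem.List.length_sorted data _ _
  simp only [hlen]
  set s := PySem.List.sorted data (fun x => x) false with hs
  set n : Int := (data.length : Int) with hn
  set q := PySem.Int.floordiv n num_bins with hq
  set r := PySem.Int.mod n num_bins with hr
  have hsne : s ≠ [] := by
    intro h
    apply hne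
    have := hlen; rw [h] at this
    exact List.eq_nil_of_length_eq_zero this.symm
  have hpos : (0 : Int) < num_bins := by omega
  have hfd : q * num_bins + r = n := PySem.Int.floordiv_mul_add_mod n num_bins
  have hrb : 0 ≤ r ∧ r < num_bins := by
    rw [hr, PySem.Int.mod_eq_emod_of_pos (a := n) (b := num_bins) hpos]
    exact ⟨Int.emod_nonneg n (by omega), Int.emod_lt_of_pos n hpos⟩
  have hneq : n = num_bins * q + r := by linarith [hfd]
  have hst0 : (0 : Int) = pvStIdx q (num_bins - r) 0 := by
    unfold pvStIdx; omega
  have hfold := pv_fold_inv (s := s) (n := n) (m := num_bins) (q := q) (r := r) hm hrb.1 hrb.2 hneq (0 : Int) (le_refl (0 : Int)) (by omega : (0:Int) ≤ num_bins) ([] : List Int) ([] : List Int)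
  simp only [List.nil_append] at hfold
  rw [← hst0] at hfold
  rw [hfold]
  rw [pv_hist_eq q num_bins r hrb.1 hrb.2]
  have hslen : (s.length : Int) = n := by rw [hlen]
  have hlpos : 0 < s.length := List.length_pos_iff.mpr hsne
  have hlast : PySem.List.pyGetD s (n - 1) 0 = PySem.List.pyGetD s (-1) 0 := by
    rw [PySem.List.pyGetD_neg_one s 0 hsne]
    rw [PySem.List.pyGetD_eq_getElem s (i := n - 1) 0 (by omega) (by omega)]
    rw [List.getLast_eq_getElem]
    congr 1
    omega
  rw [if_pos hpos, hlast]
  simp only [pvStIdx]
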